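-- pv_equiv track=rewrite | github.com/IvanKalug-QA/codewars | Duplicate_sandwich.py | duplicate_sandwich
-- ===== SOURCE A (Python) =====
-- def duplicate_sandwich(arr):
--     start = 0
--     end = 0
--     for i in range(len(arr)):
--         for j in range(i + 1, len(arr)):
--             if arr[i] == arr[j]:
--                 start = i
--                 end = j
--     return arr[start + 1: end]
-- ===== SOURCE B (Python) =====
-- def duplicate_sandwich(arr):
--     last = {}
--     for j, v in enumerate(arr):
--         last[v] = j
--     for i in range(len(arr) - 2, -1, -1):
--         j = last[arr[i]]
--         if j > i:
--             return arr[i + 1:j]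
--     return []
-- ===== Notes on version B (the rewrite author's own statement) =====
-- stated objective: faster
-- what changed: Replaces A's O(n^2) scan over all index pairs by a single pass building a last-occurrence dictionary followed by a high-to-low scan that returns at the first index with a later equal element.
import Mathlib
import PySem

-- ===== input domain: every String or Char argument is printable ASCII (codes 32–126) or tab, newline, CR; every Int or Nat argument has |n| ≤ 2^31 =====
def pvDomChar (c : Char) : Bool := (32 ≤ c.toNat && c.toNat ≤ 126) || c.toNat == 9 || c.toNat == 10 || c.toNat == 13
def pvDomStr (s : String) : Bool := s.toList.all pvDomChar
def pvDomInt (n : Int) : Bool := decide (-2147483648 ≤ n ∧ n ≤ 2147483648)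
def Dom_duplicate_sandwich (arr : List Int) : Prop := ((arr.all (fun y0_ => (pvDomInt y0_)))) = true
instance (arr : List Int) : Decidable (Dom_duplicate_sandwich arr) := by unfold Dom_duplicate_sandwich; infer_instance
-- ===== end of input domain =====

-- B replaces A's O(n^2) nested pair scan by an O(n) last-occurrence dictionary plus a
-- high-to-low scan for the first index with a later equal element.

-- ===== PORT A =====
def duplicate_sandwich (arr : List Int) : List Int :=
  -- start = 0; end = 0; for i in range(len(arr)): for j in range(i+1, len(arr)): if arr[i]==arr[j]: start,end = i,j
  let st :=
    (PySem.List.pyRange 0 arr.length 1).foldl (fun s i =>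
      (PySem.List.pyRange (i + 1) arr.length 1).foldl (fun s j =>
        if PySem.List.pyGetD arr i 0 = PySem.List.pyGetD arr j 0 then (i, j) else s) s)
      ((0 : Int), (0 : Int))
  -- return arr[start+1 : end]
  PySem.List.slice arr (some (st.1 + 1)) (some st.2)

-- ===== PORT B =====
-- last = {}; for j, v in enumerate(arr): last[v] = j
def pvLastDict (arr : List Int) : PySem.Dict Int Int :=
  (PySem.List.enumerate arr).foldl (fun d p => d.insert p.2 p.1) PySem.Dict.empty

def duplicate_sandwich_alt (arr : List Int) : List Int :=
  -- for i in range(len(arr)-2, -1, -1): j = last[arr[i]]; if j > i: return arr[i+1:j]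
  -- early return = first hit of findSome?; the trailing 'return []' is the default.
  -- (last[arr[i]] never raises: arr[i] is always a key of last; .getD 0 is that always-successful lookup)
  ((PySem.List.pyRange ((arr.length : Int) - 2) (-1) (-1)).findSome? (fun i =>
      let j := ((pvLastDict arr).get? (PySem.List.pyGetD arr i 0)).getD 0
      if j > i then some (PySem.List.slice arr (some (i + 1)) (some j)) else none)).getD []

-- ===== PRECONDITION & SPEC =====
def Spec_duplicate_sandwich (arr : List Int) (out : List Int) : Prop := out = duplicate_sandwich_alt arr
instance (arr : List Int) (out : List Int) : Decidable (Spec_duplicate_sandwich arr out) := by unfold Spec_duplicate_sandwich; infer_instance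

-- ===== CLAIM (what is proved, stated in full; the proofs are below) =====
def Claim_equal_duplicate_sandwich : Prop := ∀ (arr : List Int), Dom_duplicate_sandwich arr → Spec_duplicate_sandwich arr (duplicate_sandwich arr)

-- ===== LEMMAS AND PROOFS =====

-- A loop 'for x in l: if o(x) hit: s = value(o(x))' keeps the LAST hit: it is the first hit of the reversed list.
theorem pvFoldlOptGetD {α σ : Type} (l : List α) (o : α → Option σ) (s : σ) :
    l.foldl (fun s x => (o x).getD s) s = (l.reverse.findSome? o).getD s := by
  induction l generalizing s with
  | nil => rfl
  | cons x t ih =>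
    simp only [List.foldl_cons, ih, List.reverse_cons, List.findSome?_append]
    cases t.reverse.findSome? o <;> cases h : o x <;> simp [h]

theorem pvFindSome?_congr_mem {α σ : Type} {l : List α} {f g : α → Option σ}
    (h : ∀ x ∈ l, f x = g x) : l.findSome? f = l.findSome? g := by
  induction l with
  | nil => rfl
  | cons x t ih =>
    have hx := h x (by simp)
    simp only [List.findSome?_cons, hx, ih (fun y hy => h y (by simp [hy]))]

theorem pvFindSome?_map_opt {α σ τ : Type} (l : List α) (f : α → Option σ) (g : σ → τ) :
    l.findSome? (fun x => (f x).map g) = (l.findSome? f).map g := by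
  induction l with
  | nil => rfl
  | cons x t ih => cases h : f x <;> simp [h, ih]

-- countdown range(m-1, -1, -1) is the reversed range(0, m)
theorem pvRevRange (m : Nat) :
    PySem.List.pyRange ((m : Int) - 1) (-1) (-1) = (PySem.List.pyRange 0 (m : Int) 1).reverse := by
  induction m with
  | zero => rfl
  | succ k ih =>
    rw [PySem.List.pyRange_neg_one_cons (by omega : (-1 : Int) < (k + 1 : Nat) - 1)]
    have h1 : ((k + 1 : Nat) : Int) - 1 - 1 = (k : Int) - 1 := by push_cast; ring
    have h2 : ((k + 1 : Nat) : Int) = (k : Int) + 1 := by push_cast; ring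
    rw [h1, ih, h2, PySem.List.pyRange_one_succ_right (by positivity)]
    simp

-- shorthand for arr[i]
def pvGet (arr : List Int) (i : Int) : Int := PySem.List.pyGetD arr i 0

-- first j (scanning DOWN from len-1 to i+1) with arr[j] = arr[i]
def pvHi (arr : List Int) (i : Int) : Option Int :=
  ((PySem.List.pyRange (i + 1) arr.length 1).reverse).findSome?
    (fun j => if pvGet arr j = pvGet arr i then some j else none)

-- the inner j-loop of A, as the (i, j) pair it would leave behind
def pvInner (arr : List Int) (i : Int) : Option (Int × Int) :=
  ((PySem.List.pyRange (i + 1) arr.length 1).reverse).findSome?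
    (fun j => if pvGet arr i = pvGet arr j then some (i, j) else none)

-- the whole nested loop of A, as the last (start, end) pair written
def pvOA (arr : List Int) : Option (Int × Int) :=
  ((PySem.List.pyRange 0 arr.length 1).reverse).findSome? (pvInner arr)

theorem pvInner_eq_map_hi (arr : List Int) (i : Int) :
    pvInner arr i = (pvHi arr i).map (fun j => (i, j)) := by
  unfold pvInner pvHi
  rw [← pvFindSome?_map_opt]
  exact pvFindSome?_congr_mem (fun j _ => by
    by_cases h : pvGet arr i = pvGet arr j <;> simp [h, Ne.symm, eq_comm])

theorem pvA_eq (arr : List Int) :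
    duplicate_sandwich arr =
      PySem.List.slice arr (some (((pvOA arr).getD (0, 0)).1 + 1)) (some ((pvOA arr).getD (0, 0)).2) := by
  unfold duplicate_sandwich pvOA
  have hin : ∀ (s : Int × Int) (i : Int),
      (PySem.List.pyRange (i + 1) arr.length 1).foldl (fun s j =>
        if PySem.List.pyGetD arr i 0 = PySem.List.pyGetD arr j 0 then (i, j) else s) s
      = (pvInner arr i).getD s := by
    intro s i
    unfold pvInner
    rw [← pvFoldlOptGetD]
    refine PySem.List.foldl_congr_mem _ _ _ _ (fun s j _ => ?_)
    unfold pvGet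
    split_ifs <;> rfl
  have : (PySem.List.pyRange 0 arr.length 1).foldl (fun s i =>
      (PySem.List.pyRange (i + 1) arr.length 1).foldl (fun s j =>
        if PySem.List.pyGetD arr i 0 = PySem.List.pyGetD arr j 0 then (i, j) else s) s)
      ((0 : Int), (0 : Int))
      = (((PySem.List.pyRange 0 arr.length 1).reverse).findSome? (pvInner arr)).getD (0, 0) := by
    rw [← pvFoldlOptGetD]
    exact PySem.List.foldl_congr_mem _ _ _ _ (fun s i _ => hin s i)
  rw [this]

-- the dict 'last' answers every lookup with the LAST index of that value
theorem pvDict_get? (l : List (Int × Int)) (d : PySem.Dict Int Int) (v : Int) :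
    (l.foldl (fun d p => d.insert p.2 p.1) d).get? v =
      ((l.reverse.findSome? (fun p => if p.2 = v then some p.1 else none)).or (d.get? v)) := by
  induction l generalizing d with
  | nil => simp
  | cons p t ih =>
    simp only [List.foldl_cons, ih, List.reverse_cons, List.findSome?_append]
    rw [PySem.Dict.get?_insert]
    by_cases h : p.2 = v
    · cases ht : t.reverse.findSome? (fun p => if p.2 = v then some p.1 else none) <;>
        simp [h, ht, eq_comm]
    · cases ht : t.reverse.findSome? (fun p => if p.2 = v then some p.1 else none) <;>
        simp [h, Ne.symm h, eq_comm]

theorem pvLast_get? (arr : List Int) (v : Int) :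
    (pvLastDict arr).get? v =
      ((PySem.List.pyRange 0 arr.length 1).reverse).findSome?
        (fun j => if pvGet arr j = v then some j else none) := by
  unfold pvLastDict
  rw [pvDict_get?, PySem.List.enumerate_eq_map_pyRange arr 0]
  simp only [← List.map_reverse, List.findSome?_map, PySem.Dict.get?_empty, Option.or_none]
  have : PySem.List.len arr = (arr.length : Int) := by simp [PySem.List.len]
  rw [this]
  exact pvFindSome?_congr_mem (fun j _ => rfl)

-- splitting the scan of 'last' at i: above i it is pvHi, and at i itself arr[i] matches
theorem pvLast_split (arr : List Int) (i : Int) (h0 : 0 ≤ i) (hn : i < arr.length) :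
    ((PySem.List.pyRange 0 arr.length 1).reverse).findSome?
        (fun j => if pvGet arr j = pvGet arr i then some j else none) =
      (pvHi arr i).or (some i) := by
  rw [PySem.List.pyRange_one_append 0 (i + 1) arr.length (by omega) (by omega)]
  rw [List.reverse_append, List.findSome?_append]
  unfold pvHi
  congr 1
  rw [PySem.List.pyRange_one_succ_right h0, List.reverse_append]
  simp

-- inside the countdown range, B's loop body is A's inner result mapped through the slice
theorem pvB_body (arr : List Int) (i : Int) (h0 : 0 ≤ i) (hn : i < (arr.length : Int) - 1) :
    (let j := ((pvLastDict arr).get? (PySem.List.pyGetD arr i 0)).getD 0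
      if j > i then some (PySem.List.slice arr (some (i + 1)) (some j)) else none)
    = (pvInner arr i).map (fun p => PySem.List.slice arr (some (p.1 + 1)) (some p.2)) := by
  rw [pvInner_eq_map_hi, Option.map_map]
  have hlook : ((pvLastDict arr).get? (PySem.List.pyGetD arr i 0)) = (pvHi arr i).or (some i) := by
    rw [pvLast_get?]
    exact pvLast_split arr i h0 (by omega)
  simp only [hlook]
  cases hh : pvHi arr i with
  | none => simp
  | some m =>
    have hm : m ∈ PySem.List.pyRange (i + 1) arr.length 1 := by
      rcases List.exists_of_findSome?_eq_some hh with ⟨j, hj, hfj⟩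
      by_cases h : pvGet arr j = pvGet arr i
      · simp only [h, if_pos, Option.some.injEq] at hfj
        rw [← hfj]; exact List.mem_reverse.mp hj
      · simp [h] at hfj
    have : i < m := (PySem.List.mem_pyRange_one.mp hm).1
    simp [this]

theorem pvB_eq (arr : List Int) :
    duplicate_sandwich_alt arr =
      ((pvOA arr).map (fun p => PySem.List.slice arr (some (p.1 + 1)) (some p.2))).getD [] := by
  unfold duplicate_sandwich_alt
  have hrange : PySem.List.pyRange ((arr.length : Int) - 2) (-1) (-1)
      = (PySem.List.pyRange 0 ((arr.length : Int) - 1) 1).reverse := by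
    cases arr with
    | nil => rfl
    | cons x t =>
      have hl : ((x :: t).length : Int) - 2 = (t.length : Int) - 1 := by
        push_cast [List.length_cons]; ring
      have hl2 : ((x :: t).length : Int) - 1 = (t.length : Int) := by
        push_cast [List.length_cons]; ring
      rw [hl, hl2, pvRevRange t.length]
  have hOA : pvOA arr
      = ((PySem.List.pyRange 0 ((arr.length : Int) - 1) 1).reverse).findSome? (pvInner arr) := by
    unfold pvOA
    cases arr with
    | nil => rfl
    | cons x t =>
      have hl : ((x :: t).length : Int) = (t.length : Int) + 1 := by
        push_cast [List.length_cons]; ring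
      have hl2 : (t.length : Int) + 1 - 1 = (t.length : Int) := by ring
      rw [hl, hl2, PySem.List.pyRange_one_succ_right (by positivity), List.reverse_append]
      have hnil : pvInner (x :: t) ((t.length : Int)) = none := by
        unfold pvInner
        rw [PySem.List.pyRange_one_eq_nil hl.le]
        rfl
      simp [hnil]
  rw [hrange]
  rw [pvFindSome?_congr_mem (g := fun i => (pvInner arr i).map
        (fun p => PySem.List.slice arr (some (p.1 + 1)) (some p.2)))
      (fun i hi => by
        have hmem := PySem.List.mem_pyRange_one.mp (List.mem_reverse.mp hi)
        exact pvB_body arr i hmem.1 (by omega))]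
  rw [pvFindSome?_map_opt, ← hOA]

-- ===== VERDICT (by name: the statement is the Claim_ definition above) =====
theorem duplicate_sandwich_spec : Claim_equal_duplicate_sandwich := by
  intro arr _
  unfold Spec_duplicate_sandwich
  rw [pvA_eq, pvB_eq]
  cases h : pvOA arr with
  | some p => simp
  | none =>
    simp only [Option.getD_none, Option.map_none]
    rw [PySem.List.slice_toNat arr (by norm_num) (by norm_num)]
    simp
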